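-- pv_equiv track=rewrite | github.com/jsavarit/aoc | 2022/py/day07.py | getSizeDict
-- ===== SOURCE A (Python) =====
-- from collections import defaultdict
--
-- def getSizeDict(f):
--     currentDir = []
--     sizeDico = defaultdict(int)
--     for line in f:
--         if line[0:4] == "$ cd":
--             dir = line.strip().split(' ')[-1]
--             if dir == "..": currentDir.pop()
--             elif dir == "/" or currentDir == ["/"]: currentDir.append(dir)
--             else: currentDir.append('/'+dir)
--         else:
--             size = line.strip().split(' ')[0]
--             if (size.isnumeric()):
--                 for x in range(len(currentDir)):
--                     sizeDico["".join(currentDir[0:x+1])] += int(size)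
--     return sizeDico
-- ===== SOURCE B (Python) =====
-- def getSizeDict(f):
--     # Two staged passes: first expand the trace into a flat (directory-path, size)
--     # event stream, keeping a stack of FULL ancestor paths built incrementally
--     # (top-of-stack + new component), then aggregate the events into the dict.
--     events = []
--     paths = []
--     for line in f:
--         words = line.strip().split(' ')
--         if line.startswith("$ cd"):
--             t = words[-1]
--             if t == "..":
--                 paths.pop()
--             else:
--                 base = paths[-1] if paths else ""
--                 paths.append(base + (t if t == "/" or paths == ["/"] else '/' + t))
--         elif words[0].isnumeric():
--             n = int(words[0])
--             events += [(p, n) for p in paths]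
--     sizes = {}
--     for p, n in events:
--         sizes[p] = sizes.get(p, 0) + n
--     return sizes
-- ===== Notes on version B (the rewrite author's own statement) =====
-- stated objective: alternative
-- what changed: B is two staged passes: pass 1 keeps a stack of full ancestor paths built incrementally (top-of-stack + component) and flattens the trace into a (path, size) event list, pass 2 folds the events into the dict; A instead, for every file line, re-slices the component stack and re-joins every prefix inside one monolithic loop.
import Mathlib
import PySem

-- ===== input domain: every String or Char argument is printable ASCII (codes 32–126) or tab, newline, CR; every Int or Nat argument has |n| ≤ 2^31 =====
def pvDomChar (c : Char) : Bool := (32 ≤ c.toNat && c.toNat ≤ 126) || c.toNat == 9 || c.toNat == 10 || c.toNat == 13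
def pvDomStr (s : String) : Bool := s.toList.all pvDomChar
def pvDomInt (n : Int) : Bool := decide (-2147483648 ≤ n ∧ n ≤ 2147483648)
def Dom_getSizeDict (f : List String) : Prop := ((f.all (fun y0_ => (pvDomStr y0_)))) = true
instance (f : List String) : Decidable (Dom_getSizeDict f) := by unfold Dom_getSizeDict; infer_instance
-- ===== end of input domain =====

-- B replaces A's monolithic loop (which re-joins every prefix slice of the component
-- stack for each file line) by two staged passes: expand the trace into a flat
-- (full-path, size) event list while maintaining the full ancestor paths
-- incrementally, then fold the events into the dict (objective: alternative).

-- ===== PORT A =====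
-- one iteration of A's loop; state = (currentDir, sizeDico).
-- currentDir.pop() on [] raises IndexError in Python (excluded by Pre_); here it is dropLast.
-- s.isnumeric() is ported as strIsdigit: exact on the printable-ASCII input domain Dom_.
-- '/'+dir (string concat) is ported as ''.join; int(s) after isnumeric is total, .getD 0 unreachable.
def aStep (st : List String × PySem.Dict String Int) (line : String) :
    List String × PySem.Dict String Int :=
  if PySem.Str.slice line (some 0) (some 4) == "$ cd" then
    let dir := PySem.List.pyGetD ((PySem.Str.split? (PySem.Str.strip line) " ").getD []) (-1) ""
    if dir == ".." then (st.1.dropLast, st.2)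
    else if dir == "/" || st.1 == ["/"] then (st.1 ++ [dir], st.2)
    else (st.1 ++ [PySem.Str.join "" ["/", dir]], st.2)
  else
    let size := PySem.List.pyGetD ((PySem.Str.split? (PySem.Str.strip line) " ").getD []) 0 ""
    if PySem.Str.strIsdigit size then
      (st.1,
        (PySem.List.pyRange 0 (st.1.length : Int) 1).foldl
          (fun d x =>
            d.modify (PySem.Str.join "" (PySem.List.slice st.1 (some 0) (some (x + 1)))) 0
              (· + (PySem.Int.ofStr? size).getD 0))
          st.2)
    else st

def getSizeDict (f : List String) : List (String × Int) :=
  (f.foldl aStep ([], PySem.Dict.empty)).2.items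

-- ===== PORT B =====
-- pass 1 of B: state = (paths, events); paths holds the FULL path of every ancestor,
-- events the flat (path, size) stream.  paths.pop() on [] raises in Python (excluded by Pre_).
-- 'paths[-1] if paths else ""' is the conditional expression, string + is ''.join.
def bStep1 (st : List String × List (String × Int)) (line : String) :
    List String × List (String × Int) :=
  let words := (PySem.Str.split? (PySem.Str.strip line) " ").getD []
  if PySem.Str.startswith line "$ cd" then
    let t := PySem.List.pyGetD words (-1) ""
    if t == ".." then (st.1.dropLast, st.2)
    else
      let base := if st.1.isEmpty then "" else PySem.List.pyGetD st.1 (-1) ""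
      let piece := if t == "/" || st.1 == ["/"] then t else PySem.Str.join "" ["/", t]
      (st.1 ++ [PySem.Str.join "" [base, piece]], st.2)
  else if PySem.Str.strIsdigit (PySem.List.pyGetD words 0 "") then
    let n := (PySem.Int.ofStr? (PySem.List.pyGetD words 0 "")).getD 0
    (st.1, st.2 ++ st.1.map (fun p => (p, n)))
  else st

-- pass 2 of B: fold the event stream into the dict.
def getSizeDict_alt (f : List String) : List (String × Int) :=
  (((f.foldl bStep1 ([], [])).2).foldl
      (fun d e => d.modify e.1 0 (· + e.2)) PySem.Dict.empty).items

-- ===== PRECONDITION & SPEC =====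
-- the last word of a line, as both Pythons compute it
def pvLastWord (line : String) : String :=
  PySem.List.pyGetD ((PySem.Str.split? (PySem.Str.strip line) " ").getD []) (-1) ""

-- directory-stack balance of a trace (like a parenthesis balance): +1 per 'cd dir', -1 per 'cd ..'
def pvDepth (f : List String) : Int :=
  f.foldl
    (fun d line =>
      if PySem.Str.startswith line "$ cd" then
        if pvLastWord line == ".." then d - 1 else d + 1
      else d)
    0

-- Pre_ excludes exactly the traces on which both Pythons raise IndexError:
-- a '$ cd ..' line while the directory stack is empty (the balance dips below 0).
def Pre_getSizeDict (f : List String) : Prop := ∀ n ≤ f.length, 0 ≤ pvDepth (f.take n)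
instance (f : List String) : Decidable (Pre_getSizeDict f) := by unfold Pre_getSizeDict; infer_instance

def pvWitness_getSizeDict : List String :=
  ["$ cd /", "$ ls", "dir a", "14848514 b.txt", "$ cd a", "584 i.txt", "$ cd ..", "$ cd d", "99 j"]

def Spec_getSizeDict (f : List String) (out : List (String × Int)) : Prop := out = getSizeDict_alt f
instance (f : List String) (out : List (String × Int)) : Decidable (Spec_getSizeDict f out) := by unfold Spec_getSizeDict; infer_instance

-- ===== CLAIM (what is proved, stated in full; the proofs are below) =====
def Claim_equal_getSizeDict : Prop :=
  ∀ (f : List String), Dom_getSizeDict f → Pre_getSizeDict f → Spec_getSizeDict f (getSizeDict f)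

-- ===== LEMMAS AND PROOFS =====

-- pvP cs: the list of full prefix paths of A's component stack cs (what B's paths stack holds).
def pvP (cs : List String) : List String :=
  (List.range cs.length).map (fun x => PySem.Str.join "" (cs.take (x + 1)))

theorem chars_join_nil_flatten (pss : List (List Char)) :
    PySem.Chars.join [] pss = pss.flatten := by
  induction pss with
  | nil => simp [PySem.Chars.join_nil]
  | cons p rest ih =>
    cases rest with
    | nil => simp [PySem.Chars.join_singleton]
    | cons q r => simp [PySem.Chars.join_cons_cons] at *; simp [ih]

theorem join_empty_snoc (cs : List String) (c : String) :
    PySem.Str.join "" (cs ++ [c]) =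
      PySem.Str.join "" [PySem.Str.join "" cs, c] := by
  rw [← String.toList_inj]
  simp [PySem.Str.toList_join, chars_join_nil_flatten]

theorem join_empty_singleton (c : String) : PySem.Str.join "" [c] = c := by
  rw [← String.toList_inj]
  simp [PySem.Str.toList_join]

theorem pvP_snoc (cs : List String) (c : String) :
    pvP (cs ++ [c]) = pvP cs ++ [PySem.Str.join "" (cs ++ [c])] := by
  unfold pvP
  simp only [List.length_append, List.length_singleton, List.range_succ, List.map_append,
    List.map_cons, List.map_nil]
  congr 1
  · apply List.map_congr_left
    intro x hx
    rw [List.take_append_of_le_length (by simp at hx; omega)]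
  · rw [List.take_of_length_le (by simp)]

theorem pvP_dropLast (cs : List String) : pvP cs.dropLast = (pvP cs).dropLast := by
  induction cs using List.reverseRecOn with
  | nil => simp [pvP]
  | append_singleton ds c ih => simp [pvP_snoc]

theorem pvP_last (cs : List String) :
    (if (pvP cs).isEmpty then "" else PySem.List.pyGetD (pvP cs) (-1) "") =
      PySem.Str.join "" cs := by
  induction cs using List.reverseRecOn with
  | nil => rfl
  | append_singleton ds c ih =>
    rw [pvP_snoc]
    simp [PySem.List.pyGetD_neg_one_append_singleton]

theorem pvP_eq_root (cs : List String) : (pvP cs == ["/"]) = (cs == ["/"]) := by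
  match cs with
  | [] => rfl
  | [a] =>
    have h : pvP [a] = [a] := by simp [pvP, join_empty_singleton]
    rw [h]
  | a :: b :: t =>
    have h1 : (pvP (a :: b :: t) == ["/"]) = false := by
      rw [beq_eq_false_iff_ne]
      intro h
      have := congrArg List.length h
      simp [pvP] at this
    have h2 : ((a :: b :: t : List String) == ["/"]) = false := by
      rw [beq_eq_false_iff_ne]
      intro h
      have := congrArg List.length h
      simp at this
    rw [h1, h2]

theorem cd_test (line : String) :
    (PySem.Str.slice line (some 0) (some 4) == "$ cd") = PySem.Str.startswith line "$ cd" := by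
  rw [Bool.eq_iff_iff, beq_iff_eq, PySem.Str.startswith_eq, PySem.Chars.startswith_iff,
    List.prefix_iff_eq_take, ← String.toList_inj, PySem.Str.toList_slice]
  have h4 : ("$ cd".toList).length = 4 := rfl
  rw [h4]
  have hs : PySem.Chars.slice line.toList (some 0) (some 4) = line.toList.take 4 := by
    unfold PySem.Chars.slice
    rw [PySem.List.slice_zero_start,
      PySem.List.slice_to line.toList (show (0:Int) ≤ 4 by norm_num)]
    rfl
  rw [hs]
  exact eq_comm

theorem inner_fold (cs : List String) (g : Int → Int) (d : PySem.Dict String Int) :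
    (PySem.List.pyRange 0 (cs.length : Int) 1).foldl
        (fun d x =>
          d.modify (PySem.Str.join "" (PySem.List.slice cs (some 0) (some (x + 1)))) 0 g) d
      = (pvP cs).foldl (fun d p => d.modify p 0 g) d := by
  rw [PySem.List.pyRange_zero_natCast, List.foldl_map]
  unfold pvP
  rw [List.foldl_map]
  apply PySem.List.foldl_congr_mem
  intro acc x hx
  congr 2
  rw [PySem.List.slice_zero_start,
    show ((x : Int) + 1) = (((x + 1 : Nat) : Int)) by push_cast; ring,
    PySem.List.slice_to_natCast]

-- applying an event list to a dict (B's pass 2 as a function)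
def pvApply (d : PySem.Dict String Int) (evs : List (String × Int)) : PySem.Dict String Int :=
  evs.foldl (fun d e => d.modify e.1 0 (· + e.2)) d

theorem step_fst (cs : List String) (evs : List (String × Int))
    (d : PySem.Dict String Int) (line : String) :
    (bStep1 (pvP cs, evs) line).1 = pvP ((aStep (cs, d) line).1) := by
  simp only [bStep1, aStep, cd_test, pvP_eq_root, pvP_last]
  by_cases hcd : PySem.Str.startswith line "$ cd"
  · rw [if_pos hcd, if_pos hcd]
    by_cases hdd : (pvLastWord line == "..") = true
    · simp only [pvLastWord] at hdd
      rw [if_pos hdd, if_pos hdd, pvP_dropLast]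
    · simp only [pvLastWord] at hdd
      rw [if_neg hdd, if_neg hdd]
      by_cases hr : (PySem.List.pyGetD
          ((PySem.Str.split? (PySem.Str.strip line) " ").getD []) (-1) "" == "/"
          || cs == ["/"]) = true
      · rw [if_pos hr, if_pos hr, pvP_snoc, join_empty_snoc]
      · rw [if_neg hr, if_neg hr, pvP_snoc, join_empty_snoc]
  · rw [if_neg hcd, if_neg hcd]
    by_cases hdig : (PySem.Str.strIsdigit (PySem.List.pyGetD
        ((PySem.Str.split? (PySem.Str.strip line) " ").getD []) 0 "")) = true
    · rw [if_pos hdig, if_pos hdig]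
    · rw [if_neg hdig, if_neg hdig]

theorem step_snd (cs : List String) (evs : List (String × Int))
    (d : PySem.Dict String Int) (line : String) :
    pvApply d (bStep1 (pvP cs, evs) line).2 = (aStep (cs, pvApply d evs) line).2 := by
  simp only [bStep1, aStep, cd_test]
  by_cases hcd : PySem.Str.startswith line "$ cd"
  · rw [if_pos hcd, if_pos hcd]
    by_cases hdd : (PySem.List.pyGetD
        ((PySem.Str.split? (PySem.Str.strip line) " ").getD []) (-1) "" == "..") = true
    · rw [if_pos hdd, if_pos hdd]
    · rw [if_neg hdd, if_neg hdd]
      by_cases hr : (PySem.List.pyGetD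
          ((PySem.Str.split? (PySem.Str.strip line) " ").getD []) (-1) "" == "/"
          || cs == ["/"]) = true
      · rw [if_pos hr]
      · rw [if_neg hr]
  · rw [if_neg hcd, if_neg hcd]
    by_cases hdig : (PySem.Str.strIsdigit (PySem.List.pyGetD
        ((PySem.Str.split? (PySem.Str.strip line) " ").getD []) 0 "")) = true
    · rw [if_pos hdig, if_pos hdig]
      unfold pvApply
      rw [List.foldl_append, List.foldl_map, inner_fold]
    · rw [if_neg hdig, if_neg hdig]

theorem fold_rel (f : List String) (cs : List String) (evs : List (String × Int))
    (d : PySem.Dict String Int) :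
    pvApply d (f.foldl bStep1 (pvP cs, evs)).2 = (f.foldl aStep (cs, pvApply d evs)).2 := by
  induction f generalizing cs evs with
  | nil => rfl
  | cons line rest ih =>
    rw [List.foldl_cons, List.foldl_cons]
    have h1 : bStep1 (pvP cs, evs) line
        = (pvP ((aStep (cs, pvApply d evs) line).1), (bStep1 (pvP cs, evs) line).2) := by
      rw [← step_fst cs evs (pvApply d evs) line]
    rw [h1, ih ((aStep (cs, pvApply d evs) line).1) ((bStep1 (pvP cs, evs) line).2),
      step_snd cs evs d line]

-- ===== VERDICT (by name: the statement is the Claim_ definition above) =====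
theorem getSizeDict_spec : Claim_equal_getSizeDict := by
  intro f _ _
  unfold Spec_getSizeDict getSizeDict getSizeDict_alt
  have h := fold_rel f [] [] PySem.Dict.empty
  have hP : pvP [] = [] := by simp [pvP]
  rw [hP] at h
  have h0 : pvApply PySem.Dict.empty ([] : List (String × Int)) = PySem.Dict.empty := rfl
  rw [h0] at h
  rw [show (((f.foldl bStep1 ([], [])).2).foldl
      (fun d e => d.modify e.1 0 (· + e.2)) PySem.Dict.empty)
    = pvApply PySem.Dict.empty (f.foldl bStep1 ([], [])).2 from rfl, h]
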